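-- pv_equiv track=rewrite | github.com/nanchengxi/jjdouzeroAuto | Auto_JJ2/CheckRules.py | is_feiji_string
-- ===== SOURCE A (Python) =====
-- def is_sequence_string(cards):
--     # 判断字符串是否连续
--     card_values = {"3": 3, "4": 4, "5": 5, "6": 6, "7": 7, "8": 8, "9": 9, "T": 10, "J": 11, "Q": 12, "K": 13, "A": 14,
--                    "2": 15, "X": 16, "D": 17}
--     cards_list = list(cards)
--     cards_list.sort(key=lambda x: card_values[x])
--     for i in range(1, len(cards_list)):
--         if card_values[cards_list[i]] - card_values[cards_list[i - 1]] != 1: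
--             return False
--     return True
--
-- def is_feiji_string(string):
--     # 判断3连
--     result = []
--     for char in string:
--         if string.count(char) == 3 and char not in result:
--             result.append(char)
--     if result:
--         return is_sequence_string(result)
--     else:
--         return False
-- ===== SOURCE B (Python) =====
-- def is_feiji_string(string):
--     # One-pass frequency count, then a closed-form min/max consecutiveness test
--     # over the distinct values of the exactly-triply-occurring cards.
--     card_values = {"3": 3, "4": 4, "5": 5, "6": 6, "7": 7, "8": 8, "9": 9, "T": 10, "J": 11, "Q": 12, "K": 13, "A": 14,
--                    "2": 15, "X": 16, "D": 17}
--     counts = {}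
--     for ch in string:
--         counts[ch] = counts.get(ch, 0) + 1
--     vals = {card_values[c] for c, k in counts.items() if k == 3}
--     if not vals:
--         return False
--     return max(vals) - min(vals) + 1 == len(vals)
-- ===== Notes on version B (the rewrite author's own statement) =====
-- stated objective: faster
-- what changed: Replaces the per-character string.count rescan plus sort-and-adjacent-difference check with a single-pass frequency dict and a closed-form max-min+1 == len consecutiveness test over the set of values of exactly-triply-occurring cards.
import Mathlib
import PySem

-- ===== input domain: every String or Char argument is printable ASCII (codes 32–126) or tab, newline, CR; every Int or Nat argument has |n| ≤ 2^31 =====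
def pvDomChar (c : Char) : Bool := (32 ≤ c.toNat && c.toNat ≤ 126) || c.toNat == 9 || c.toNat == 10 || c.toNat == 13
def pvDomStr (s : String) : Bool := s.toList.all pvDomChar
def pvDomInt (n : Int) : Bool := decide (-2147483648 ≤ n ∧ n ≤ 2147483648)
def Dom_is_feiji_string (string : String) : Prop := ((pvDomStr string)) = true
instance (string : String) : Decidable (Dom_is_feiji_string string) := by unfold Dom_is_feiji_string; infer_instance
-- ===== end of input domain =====

-- B replaces A's per-character string.count rescan and sort+adjacent-difference scan by a one-pass
-- frequency dict and a closed-form max-min+1 == len consecutiveness test (objective: faster).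

-- ===== PORT A =====
def card_values : PySem.Dict Char Int :=
  PySem.Dict.ofList [('3',3),('4',4),('5',5),('6',6),('7',7),('8',8),('9',9),('T',10),('J',11),('Q',12),('K',13),('A',14),('2',15),('X',16),('D',17)]

-- card_values[x] raises KeyError on an unknown card; under Pre_ every looked-up char is a key,
-- so the total form (get? …).getD 0 is exact there.
def is_sequence_string (cards : List Char) : Bool :=
  let cards_list := PySem.List.sorted cards (fun x => (card_values.get? x).getD 0)
  (PySem.List.pyRange 1 (cards_list.length : Int) 1).foldl
    (fun acc i =>
      acc && (((card_values.get? (PySem.List.pyGetD cards_list i ' ')).getD 0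
             - (card_values.get? (PySem.List.pyGetD cards_list (i-1) ' ')).getD 0) == 1)) true

def is_feiji_string (string : String) : Bool :=
  let result : List Char := string.toList.foldl
    (fun res ch => if (PySem.Chars.count string.toList [ch] == 3) && !(res.contains ch) then res ++ [ch] else res) []
  if !result.isEmpty then is_sequence_string result else false

-- ===== PORT B =====
-- card_values[c] in the set comprehension raises KeyError on an unknown triply-occurring card;
-- under Pre_ every such c is a key, so the total form (get? …).getD 0 is exact there.
def is_feiji_string_alt (string : String) : Bool :=
  let counts : PySem.Dict Char Int :=
    string.toList.foldl (fun d c => d.insert c (d.getD c 0 + 1)) PySem.Dict.empty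
  let vals : PySem.Set Int :=
    PySem.Set.ofList ((counts.items.filter (fun p => p.2 == 3)).map (fun p => (card_values.get? p.1).getD 0))
  if vals.isEmpty then false
  else ((PySem.List.max? vals (fun v => v)).getD 0 - (PySem.List.min? vals (fun v => v)).getD 0 + 1) == (vals.length : Int)

-- ===== PRECONDITION & SPEC =====
-- Pre_ excludes exactly the inputs on which A raises KeyError (B raises there too): a character
-- occurring exactly three times that is not one of the 15 card characters.
def Pre_is_feiji_string (string : String) : Prop :=
  (string.toList.all (fun c => !(string.toList.count c == 3) ||
    (['3','4','5','6','7','8','9','T','J','Q','K','A','2','X','D'] : List Char).contains c)) = true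
instance (string : String) : Decidable (Pre_is_feiji_string string) := by unfold Pre_is_feiji_string; infer_instance

def pvWitness_is_feiji_string : String := "333"

def Spec_is_feiji_string (string : String) (out : Bool) : Prop := out = is_feiji_string_alt string
instance (string : String) (out : Bool) : Decidable (Spec_is_feiji_string string out) := by unfold Spec_is_feiji_string; infer_instance

-- ===== CLAIM (what is proved, stated in full; the proofs are below) =====
def Claim_equal_is_feiji_string : Prop := ∀ (string : String), Dom_is_feiji_string string → Pre_is_feiji_string string → Spec_is_feiji_string string (is_feiji_string string)

-- ===== LEMMAS AND PROOFS =====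

-- the card characters in ascending value order
def ccL : List Char := ['3','4','5','6','7','8','9','T','J','Q','K','A','2','X','D']

-- the card-value key, total form
def keyV (c : Char) : Int := (card_values.get? c).getD 0

-- string.count(ch) for a single character is List.count
theorem count_singleton_go (c : Char) (fuel : Nat) (l : List Char) (acc : Nat)
    (h : l.length ≤ fuel) : PySem.Chars.count.go [c] fuel l acc = acc + l.count c := by
  induction fuel generalizing l acc with
  | zero =>
    interval_cases hl : l.length
    · simp_all [List.length_eq_zero_iff.mp hl, PySem.Chars.count.go]
  | succ fuel ih =>
    cases l with
    | nil => simp [PySem.Chars.count.go]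
    | cons a t =>
      simp only [PySem.Chars.count.go]
      by_cases hp : ([c].isPrefixOf (a :: t)) = true
      · have hc : c = a := by simpa [List.isPrefixOf] using hp
        simp only [hp, if_pos]
        rw [ih _ _ (by simpa using Nat.le_of_succ_le_succ (by simpa using h))]
        subst hc
        simp
        omega
      · have hc : ¬ (c = a) := by simpa [List.isPrefixOf] using hp
        simp only [hp, if_neg, Bool.false_eq_true, not_false_iff]
        rw [ih _ _ (by simpa using Nat.le_of_succ_le_succ (by simpa using h))]
        simp [Ne.symm hc]

theorem count_singleton (l : List Char) (c : Char) :
    PySem.Chars.count l [c] = l.count c := by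
  simp [PySem.Chars.count, count_singleton_go c l.length l 0 le_rfl]
-- A's result-building loop: nodup accumulator of the chars satisfying p, in first-occurrence order
theorem result_fold_spec (p : Char → Bool) : ∀ (l acc : List Char), acc.Nodup →
    (l.foldl (fun res ch => if (p ch) && !(res.contains ch) then res ++ [ch] else res) acc).Nodup ∧
    (∀ c, c ∈ l.foldl (fun res ch => if (p ch) && !(res.contains ch) then res ++ [ch] else res) acc ↔
      c ∈ acc ∨ (c ∈ l ∧ p c = true)) := by
  intro l
  induction l with
  | nil => intro acc h; simpa using h
  | cons a t ih =>
    intro acc h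
    simp only [List.foldl_cons]
    by_cases hpa : p a = true
    · by_cases hca : acc.contains a = true
      · have := ih acc h
        simp only [hpa, hca, Bool.not_true, Bool.and_false, if_neg, Bool.false_eq_true, not_false_iff]
        refine ⟨this.1, fun c => ?_⟩
        rw [(this.2 c)]
        constructor
        · rintro (hc | hc)
          · exact Or.inl hc
          · exact Or.inr ⟨List.mem_cons_of_mem _ hc.1, hc.2⟩
        · rintro (hc | ⟨hc1, hc2⟩)
          · exact Or.inl hc
          · rcases List.mem_cons.mp hc1 with rfl | hc1
            · exact Or.inl (by simpa using hca)
            · exact Or.inr ⟨hc1, hc2⟩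
      · have haa : a ∉ acc := by simpa [List.contains_iff_mem] using hca
        have hnd : (acc ++ [a]).Nodup := by
          simp [List.nodup_append, h]
          exact fun x hx hxa => haa (hxa ▸ hx)
        have := ih (acc ++ [a]) hnd
        simp only [hpa, hca, Bool.not_false, Bool.and_true, if_pos]
        refine ⟨this.1, fun c => ?_⟩
        rw [(this.2 c)]
        simp only [List.mem_append, List.mem_cons, List.not_mem_nil, or_false]
        constructor
        · rintro ((hc | rfl) | hc)
          · exact Or.inl hc
          · exact Or.inr ⟨Or.inl rfl, hpa⟩
          · exact Or.inr ⟨Or.inr hc.1, hc.2⟩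
        · rintro (hc | ⟨rfl | hc1, hc2⟩)
          · exact Or.inl (Or.inl hc)
          · exact Or.inl (Or.inr rfl)
          · exact Or.inr ⟨hc1, hc2⟩
    · have := ih acc h
      simp only [hpa, Bool.false_and, if_neg, Bool.false_eq_true, not_false_iff]
      refine ⟨this.1, fun c => ?_⟩
      rw [(this.2 c)]
      constructor
      · rintro (hc | hc)
        · exact Or.inl hc
        · exact Or.inr ⟨List.mem_cons_of_mem _ hc.1, hc.2⟩
      · rintro (hc | ⟨hc1, hc2⟩)
        · exact Or.inl hc
        · rcases List.mem_cons.mp hc1 with rfl | hc1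
          · exact absurd hc2 (by simpa using hpa)
          · exact Or.inr ⟨hc1, hc2⟩
-- adjacent differences all 1
def Adj (vs : List Int) : Prop := ∀ j, (h : j + 1 < vs.length) → vs[j+1] - vs[j] = 1

theorem adj_cons (x y : Int) (t : List Int) :
    Adj (x :: y :: t) ↔ y = x + 1 ∧ Adj (y :: t) := by
  constructor
  · intro hA
    refine ⟨?_, fun j hj => ?_⟩
    · have h0 := hA 0 (by simp)
      simp at h0
      omega
    · have := hA (j+1) (by simpa using hj)
      simpa using this
  · rintro ⟨hy, hA⟩ j hj
    cases j with
    | zero => simp; omega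
    | succ j => have := hA j (by simpa using hj); simpa using this

theorem spread (t : List Int) : ∀ x : Int, (x :: t).Pairwise (· < ·) →
    x + t.length ≤ (x :: t).getLast (List.cons_ne_nil x t) := by
  induction t with
  | nil => intro x _; simp
  | cons y t ih =>
    intro x hp
    have h1 : x < y := (List.pairwise_cons.mp hp).1 y List.mem_cons_self
    have h2 := ih y (List.pairwise_cons.mp hp).2
    rw [List.getLast_cons (List.cons_ne_nil y t)]
    simp only [List.length_cons]
    push_cast
    omega

theorem last_isMax (t : List Int) : ∀ x : Int, (x :: t).Pairwise (· < ·) →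
    ∀ y ∈ (x :: t), y ≤ (x :: t).getLast (List.cons_ne_nil x t) := by
  induction t with
  | nil => intro x _ y hy; simp at hy; simp [hy]
  | cons z t ih =>
    intro x hp y hy
    rw [List.getLast_cons (List.cons_ne_nil z t)]
    rcases List.mem_cons.mp hy with rfl | hy
    · have hxz : y < z := (List.pairwise_cons.mp hp).1 z List.mem_cons_self
      have := ih z (List.pairwise_cons.mp hp).2 z List.mem_cons_self
      omega
    · exact ih z (List.pairwise_cons.mp hp).2 y hy

theorem core_consec (t : List Int) : ∀ x : Int, (x :: t).Pairwise (· < ·) →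
    (Adj (x :: t) ↔ (x :: t).getLast (List.cons_ne_nil x t) = x + t.length) := by
  induction t with
  | nil => intro x _; constructor
           · intro _; simp
           · intro _ j hj; simp at hj
  | cons y t ih =>
    intro x hp
    have hxy : x < y := (List.pairwise_cons.mp hp).1 y List.mem_cons_self
    have hpt : (y :: t).Pairwise (· < ·) := (List.pairwise_cons.mp hp).2
    rw [adj_cons, ih y hpt, List.getLast_cons (List.cons_ne_nil y t)]
    have hsp := spread t y hpt
    simp only [List.length_cons]
    push_cast
    omega
theorem foldl_and (p : Int → Bool) (l : List Int) : ∀ a : Bool,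
    l.foldl (fun acc i => acc && p i) a = (a && l.all p) := by
  induction l with
  | nil => intro a; simp
  | cons x t ih => intro a; simp [ih, Bool.and_assoc]

theorem max?_id_perm (l l' : List Int) (h : l.Perm l') :
    PySem.List.max? l (fun v => v) = PySem.List.max? l' (fun v => v) := by
  cases hl : PySem.List.max? l (fun v => v) with
  | none =>
    rw [PySem.List.max?_eq_none_iff] at hl
    subst hl
    rw [eq_comm, PySem.List.max?_eq_none_iff]
    exact h.symm.eq_nil
  | some m =>
    cases hl' : PySem.List.max? l' (fun v => v) with
    | none =>
      rw [PySem.List.max?_eq_none_iff] at hl'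
      subst hl'
      rw [h.eq_nil] at hl; simp [PySem.List.max?] at hl
    | some m' =>
      have h1 := PySem.List.max?_isMax hl m' (h.symm.mem_iff.mp (PySem.List.max?_mem hl'))
      have h2 := PySem.List.max?_isMax hl' m (h.mem_iff.mp (PySem.List.max?_mem hl))
      simp only [Option.some.injEq]
      exact le_antisymm h2 h1

theorem min?_id_perm (l l' : List Int) (h : l.Perm l') :
    PySem.List.min? l (fun v => v) = PySem.List.min? l' (fun v => v) := by
  cases hl : PySem.List.min? l (fun v => v) with
  | none =>
    rw [PySem.List.min?_eq_none_iff] at hl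
    subst hl
    rw [eq_comm, PySem.List.min?_eq_none_iff]
    exact h.symm.eq_nil
  | some m =>
    cases hl' : PySem.List.min? l' (fun v => v) with
    | none =>
      rw [PySem.List.min?_eq_none_iff] at hl'
      subst hl'
      rw [h.eq_nil] at hl; simp [PySem.List.min?] at hl
    | some m' =>
      have h1 := PySem.List.min?_isMin hl m' (h.symm.mem_iff.mp (PySem.List.min?_mem hl'))
      have h2 := PySem.List.min?_isMin hl' m (h.mem_iff.mp (PySem.List.min?_mem hl))
      simp only [Option.some.injEq]
      exact le_antisymm h1 h2

theorem max?_sorted_cons (x : Int) (t : List Int) (hp : (x :: t).Pairwise (· < ·)) :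
    PySem.List.max? (x :: t) (fun v => v) = some ((x :: t).getLast (List.cons_ne_nil x t)) := by
  cases hl : PySem.List.max? (x :: t) (fun v => v) with
  | none => rw [PySem.List.max?_eq_none_iff] at hl; exact absurd hl (List.cons_ne_nil x t)
  | some m =>
    have h1 := last_isMax t x hp m (PySem.List.max?_mem hl)
    have h2 := PySem.List.max?_isMax hl _ (List.getLast_mem (List.cons_ne_nil x t))
    simp only [Option.some.injEq]
    exact le_antisymm h1 h2

theorem min?_sorted_cons (x : Int) (t : List Int) (hp : (x :: t).Pairwise (· < ·)) :
    PySem.List.min? (x :: t) (fun v => v) = some x := by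
  cases hl : PySem.List.min? (x :: t) (fun v => v) with
  | none => rw [PySem.List.min?_eq_none_iff] at hl; exact absurd hl (List.cons_ne_nil x t)
  | some m =>
    have h1 := PySem.List.min?_isMin hl x List.mem_cons_self
    have h2 : x ≤ m := by
      rcases List.mem_cons.mp (PySem.List.min?_mem hl) with rfl | hm
      · exact le_rfl
      · exact le_of_lt ((List.pairwise_cons.mp hp).1 m hm)
    simp only [Option.some.injEq]
    exact le_antisymm h1 h2

theorem loop_eq_adj (zs : List Char) :
    (((PySem.List.pyRange 1 (zs.length : Int) 1).foldl
      (fun acc i =>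
        acc && (((card_values.get? (PySem.List.pyGetD zs i ' ')).getD 0
               - (card_values.get? (PySem.List.pyGetD zs (i-1) ' ')).getD 0) == 1)) true) = true)
    ↔ Adj (zs.map keyV) := by
  rw [foldl_and, Bool.true_and, List.all_eq_true]
  constructor
  · intro h j hj
    simp only [List.length_map] at hj
    have := h ((j+1 : Nat) : Int) (by rw [PySem.List.mem_pyRange_one]; omega)
    rw [show ((j+1 : Nat) : Int) - 1 = ((j : Nat) : Int) by omega] at this
    rw [PySem.List.pyGetD_natCast, PySem.List.pyGetD_natCast] at this
    rw [List.getD_eq_getElem _ _ hj, List.getD_eq_getElem _ _ (by omega)] at this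
    simp only [beq_iff_eq] at this
    simp only [List.getElem_map, keyV]
    omega
  · intro h i hi
    rw [PySem.List.mem_pyRange_one] at hi
    obtain ⟨j, rfl⟩ : ∃ j : Nat, i = ((j+1 : Nat) : Int) :=
      ⟨(i - 1).toNat, by omega⟩
    have hj : j + 1 < (zs.map keyV).length := by simp; omega
    have := h j hj
    simp only [List.length_map] at hj
    simp only [List.getElem_map, keyV] at this
    rw [show ((j+1 : Nat) : Int) - 1 = ((j : Nat) : Int) by omega]
    rw [PySem.List.pyGetD_natCast, PySem.List.pyGetD_natCast]
    rw [List.getD_eq_getElem _ _ hj, List.getD_eq_getElem _ _ (by omega)]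
    simp only [beq_iff_eq]
    omega
set_option maxRecDepth 8192 in
theorem keyV_pairwise_ccL : ccL.Pairwise (fun a b => keyV a < keyV b) := by decide

theorem keyV_inj_ccL : ∀ a ∈ ccL, ∀ b ∈ ccL, keyV a = keyV b → a = b := by
  have hp : ccL.Pairwise (fun a b => keyV a ≠ keyV b) :=
    keyV_pairwise_ccL.imp (fun h => ne_of_lt h)
  intro a ha b hb hab
  by_contra hne
  exact hp.forall (fun _ _ h => Ne.symm h) ha hb hne hab

theorem ccL_nodup : ccL.Nodup := by decide

theorem main_eq (string : String)
    (hpre : ∀ c ∈ string.toList, string.toList.count c = 3 → c ∈ ccL) :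
    is_feiji_string string = is_feiji_string_alt string := by
  have hres := result_fold_spec (fun ch => (PySem.Chars.count string.toList [ch] == 3))
    string.toList [] List.nodup_nil
  set l := string.toList with hl
  set result := l.foldl
    (fun res ch => if (PySem.Chars.count l [ch] == 3) && !(res.contains ch) then res ++ [ch] else res)
    [] with hresult
  have hmemres : ∀ c, c ∈ result ↔ c ∈ l ∧ l.count c = 3 := by
    intro c
    rw [hres.2 c]
    simp [count_singleton]
  set ysL := ccL.filter (fun c => l.count c == 3) with hys
  have hmemys : ∀ c, c ∈ ysL ↔ c ∈ l ∧ l.count c = 3 := by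
    intro c
    rw [hys]
    simp only [List.mem_filter, beq_iff_eq]
    constructor
    · rintro ⟨hcc, h3⟩
      exact ⟨List.count_pos_iff.mp (by omega), h3⟩
    · rintro ⟨hcl, h3⟩
      exact ⟨hpre c hcl h3, h3⟩
  have hysnodup : ysL.Nodup := ccL_nodup.filter _
  have hyspair : ysL.Pairwise (fun a b => keyV a < keyV b) := keyV_pairwise_ccL.filter _
  have hperm : ysL.Perm result :=
    (List.perm_ext_iff_of_nodup hysnodup hres.1).mpr (fun c => by rw [hmemys, hmemres])
  -- B side normalization
  set ws := (PySem.Set.ofList l).filter (fun k => (l.count k : Int) == 3) with hws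
  have hmemws : ∀ c, c ∈ ws ↔ c ∈ l ∧ l.count c = 3 := by
    intro c
    rw [hws]
    simp only [List.mem_filter, PySem.Set.mem_ofList, beq_iff_eq]
    constructor
    · rintro ⟨hcl, h3⟩
      exact ⟨hcl, by exact_mod_cast h3⟩
    · rintro ⟨hcl, h3⟩
      exact ⟨hcl, by exact_mod_cast h3⟩
  have hwsnodup : ws.Nodup := (PySem.Set.nodup_ofList l).filter _
  have hpermws : ws.Perm ysL :=
    (List.perm_ext_iff_of_nodup hwsnodup hysnodup).mpr (fun c => by rw [hmemws, hmemys])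
  have hwsmap : (ws.map keyV).Nodup := by
    refine List.Nodup.map_on ?_ hwsnodup
    intro a ha b hb hab
    exact keyV_inj_ccL a (hpre a ((hmemws a).mp ha).1 ((hmemws a).mp ha).2)
      b (hpre b ((hmemws b).mp hb).1 ((hmemws b).mp hb).2) hab
  have hBvals : is_feiji_string_alt string =
      (if (ws.map keyV).isEmpty then false
       else (((PySem.List.max? (ws.map keyV) (fun v => v)).getD 0
            - (PySem.List.min? (ws.map keyV) (fun v => v)).getD 0 + 1) == ((ws.map keyV).length : Int))) := by
    rw [is_feiji_string_alt]
    rw [← hl, PySem.Dict.foldl_insert_getD_add_one_eq_counter, PySem.Dict.items_counter]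
    rw [List.filter_map, List.map_map]
    have : (PySem.Set.ofList l).filter ((fun p => p.2 == 3) ∘ (fun k => (k, (l.count k : Int)))) = ws := by
      rw [hws]; rfl
    rw [this]
    have : ((fun p => (card_values.get? p.1).getD 0) ∘ (fun k => (k, (l.count k : Int)))) = keyV := by
      rfl
    rw [this]
    rw [PySem.Set.ofList_eq_self_of_nodup _ hwsmap]
  have hpermmap : (ws.map keyV).Perm (ysL.map keyV) := hpermws.map keyV
  -- case split on ysL
  cases hcase : ysL with
  | nil =>
    have hresnil : result = [] := (hcase ▸ hperm).symm.eq_nil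
    have hwsnil : ws = [] := (hcase ▸ hpermws).eq_nil
    rw [is_feiji_string, ← hl, ← hresult, hresnil, hBvals, hwsnil]
    simp
  | cons y t =>
    have hresne : result ≠ [] := by
      intro h0
      rw [h0] at hperm
      have h1 : ysL = [] := hperm.eq_nil
      rw [hcase] at h1
      exact List.cons_ne_nil y t h1
    have hA : is_feiji_string string = is_sequence_string result := by
      rw [is_feiji_string, ← hl, ← hresult]
      simp [hresne]
    have hsorted : PySem.List.sorted result (fun x => (card_values.get? x).getD 0) = ysL :=
      PySem.List.sorted_eq_of_perm_of_pairwise_lt _ _ _ hperm hyspair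
    rw [hA, is_sequence_string, hsorted, hcase]
    -- the B side
    rw [hBvals]
    have hvalsne : (ws.map keyV).isEmpty = false := by
      rw [List.isEmpty_eq_false_iff_exists_mem]
      exact ⟨keyV y, (hcase ▸ hpermmap).symm.mem_iff.mp (by simp)⟩
    rw [hvalsne]
    simp only [Bool.false_eq_true, if_false]
    -- both are now Bool expressions over the value list vs
    have hpairvs : ((y :: t).map keyV).Pairwise (· < ·) := by
      rw [← hcase]
      exact List.pairwise_map.mpr hyspair
    rw [List.map_cons] at hpairvs
    have hmax := max?_id_perm _ _ (hcase ▸ hpermmap)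
    rw [List.map_cons, max?_sorted_cons _ _ hpairvs] at hmax
    have hmin := min?_id_perm _ _ (hcase ▸ hpermmap)
    rw [List.map_cons, min?_sorted_cons _ _ hpairvs] at hmin
    have hpm : (ws.map keyV).Perm ((y :: t).map keyV) := hcase ▸ hpermmap
    have hlen : (ws.map keyV).length = t.length + 1 := by
      rw [hpm.length_eq]
      simp
    rw [Bool.eq_iff_iff]
    rw [loop_eq_adj (y :: t), List.map_cons]
    rw [core_consec _ _ hpairvs]
    rw [hmax, hmin, hlen]
    simp only [Option.getD_some, beq_iff_eq, List.length_map]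
    have hsp := spread (t.map keyV) (keyV y) hpairvs
    constructor
    · intro h
      rw [h]
      push_cast
      ring
    · intro h
      push_cast at h
      omega

-- ===== VERDICT (by name: the statement is the Claim_ definition above) =====
theorem is_feiji_string_spec : Claim_equal_is_feiji_string := by
  intro string _ hpre
  unfold Spec_is_feiji_string
  refine main_eq string ?_
  intro c hc h3
  have hall := List.all_eq_true.mp hpre c hc
  rw [h3] at hall
  simpa [ccL] using hall
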